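-- pv_equiv track=rewrite | github.com/eliasjacob/datacentric_ai_course | helpers/ner.py | add_iob_tags
-- ===== SOURCE A (Python) =====
-- def add_iob_tags(tokens_with_labels):
--     """
--     Add IOB tags (B- and I-) to a list of tuples with tokens and labels.
--
--     Args:
--         tokens_with_labels (List[Tuple[str, str]]): List of tuples with tokens and labels without IOB tags.
--
--     Returns:
--         List[Tuple[str, str]]: List of tuples with tokens and labels with IOB tags.
--     """
--
--     tokens_with_labels = [(token, remove_iob_tag(label)) for token, label in tokens_with_labels]
--
--     iob_tokens_with_labels = []
--     prev_label = "O"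
--
--     for token, label in tokens_with_labels:
--         if label == "O":
--             iob_tokens_with_labels.append((token, label))
--             prev_label = "O"
--         else:
--             if prev_label != label:
--                 iob_tokens_with_labels.append((token, "B-" + label))
--             else:
--                 iob_tokens_with_labels.append((token, "I-" + label))
--             prev_label = label
--
--     return iob_tokens_with_labels
--
-- def remove_iob_tag(label):
--     """
--     Removes the 'B-' and 'I-' prefixes from an IOB label.
--
--     Args:
--         label: The IOB label to process.
--
--     Returns:
--         The label without the 'B-' or 'I-' prefix.
--     """
--     return label.replace('B-', '').replace('I-', '')
-- ===== SOURCE B (Python) =====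
-- def remove_iob_tag(label):
--     return label.replace('B-', '').replace('I-', '')
--
--
-- def add_iob_tags(tokens_with_labels):
--     """Run-grouping re-implementation: normalize labels, then walk the list run by
--     run of equal labels; an 'O' run is copied verbatim, any other run gets 'B-' on
--     its first token and 'I-' on the rest."""
--     norm = [(token, remove_iob_tag(label)) for token, label in tokens_with_labels]
--     out = []
--     i = 0
--     n = len(norm)
--     while i < n:
--         token, label = norm[i]
--         j = i + 1
--         while j < n and norm[j][1] == label:
--             j += 1
--         if label == "O":
--             out.extend(norm[i:j])
--         else:
--             out.append((token, "B-" + label))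
--             out.extend((t, "I-" + label) for t, _ in norm[i + 1:j])
--         i = j
--     return out
-- ===== Notes on version B (the rewrite author's own statement) =====
-- stated objective: alternative
-- what changed: Replaces A's token-by-token loop carrying a prev_label state variable with a run-grouping traversal: the normalized list is consumed one maximal run of equal labels at a time, copying 'O' runs verbatim and tagging other runs first-token 'B-', rest 'I-'.
import Mathlib
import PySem

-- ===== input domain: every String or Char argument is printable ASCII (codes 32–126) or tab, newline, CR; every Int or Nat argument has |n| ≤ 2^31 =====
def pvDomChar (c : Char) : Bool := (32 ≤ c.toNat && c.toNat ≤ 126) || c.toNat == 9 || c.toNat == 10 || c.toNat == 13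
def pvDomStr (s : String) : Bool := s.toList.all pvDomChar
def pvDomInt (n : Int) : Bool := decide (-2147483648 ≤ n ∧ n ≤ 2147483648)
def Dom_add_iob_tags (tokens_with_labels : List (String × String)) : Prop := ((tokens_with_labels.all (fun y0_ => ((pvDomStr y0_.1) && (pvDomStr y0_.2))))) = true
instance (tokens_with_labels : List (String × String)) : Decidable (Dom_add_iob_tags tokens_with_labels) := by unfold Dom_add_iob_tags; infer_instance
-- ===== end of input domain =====

-- B replaces A's prev_label state machine with a run-grouping traversal (alternative decomposition, same O(n) cost).


-- ===== PORT A =====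
def remove_iob_tag (label : String) : String :=
  PySem.Str.replace (PySem.Str.replace label "B-" "") "I-" ""

-- A's loop body: state = (iob_tokens_with_labels, prev_label)
def stepA (st : List (String × String) × String) (p : String × String) :
    List (String × String) × String :=
  if p.2 == "O" then (st.1 ++ [(p.1, p.2)], "O")
  else if st.2 != p.2 then (st.1 ++ [(p.1, "B-" ++ p.2)], p.2)
  else (st.1 ++ [(p.1, "I-" ++ p.2)], p.2)

def add_iob_tags (tokens_with_labels : List (String × String)) : List (String × String) :=
  let tokens_with_labels := tokens_with_labels.map (fun p => (p.1, remove_iob_tag p.2))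
  (tokens_with_labels.foldl stepA ([], "O")).1

-- ===== PORT B =====
-- run-grouping core: consume one maximal run of equal normalized labels at a time
def iobRuns : List (String × String) → List (String × String)
  | [] => []
  | (token, label) :: rest =>
    let run := rest.takeWhile (fun p => p.2 == label)
    let rest' := rest.dropWhile (fun p => p.2 == label)
    if label == "O" then
      (token, label) :: (run ++ iobRuns rest')
    else
      (token, "B-" ++ label) :: (run.map (fun p => (p.1, "I-" ++ label)) ++ iobRuns rest')
termination_by l => l.length
decreasing_by
  all_goals simp only [List.length_cons]
  all_goals exact Nat.lt_succ_of_le (List.length_dropWhile_le _ _)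

def add_iob_tags_alt (tokens_with_labels : List (String × String)) : List (String × String) :=
  iobRuns (tokens_with_labels.map (fun p => (p.1, remove_iob_tag p.2)))

-- ===== PRECONDITION & SPEC =====
def Spec_add_iob_tags (tokens_with_labels : List (String × String)) (out : List (String × String)) : Prop := out = add_iob_tags_alt tokens_with_labels
instance (tokens_with_labels : List (String × String)) (out : List (String × String)) : Decidable (Spec_add_iob_tags tokens_with_labels out) := by unfold Spec_add_iob_tags; infer_instance

-- ===== CLAIM (what is proved, stated in full; the proofs are below) =====
def Claim_equal_add_iob_tags : Prop := ∀ (tokens_with_labels : List (String × String)), Dom_add_iob_tags tokens_with_labels → Spec_add_iob_tags tokens_with_labels (add_iob_tags tokens_with_labels)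

-- ===== LEMMAS AND PROOFS =====

-- A's loop as a structural recursion carrying prev_label (the accumulator factored out)
def emitA (prev : String) : List (String × String) → List (String × String)
  | [] => []
  | (token, label) :: rest =>
    if label == "O" then (token, label) :: emitA "O" rest
    else if prev != label then (token, "B-" ++ label) :: emitA label rest
    else (token, "I-" ++ label) :: emitA label rest

lemma foldA_eq_emitA (xs : List (String × String)) : ∀ (acc : List (String × String)) (prev : String),
    (xs.foldl stepA (acc, prev)).1 = acc ++ emitA prev xs := by
  induction xs with
  | nil => intro acc prev; simp [emitA]
  | cons p rest ih =>
    intro acc prev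
    obtain ⟨token, label⟩ := p
    rw [List.foldl_cons]
    by_cases hO : (label == "O") = true
    · have hstep : stepA (acc, prev) (token, label) = (acc ++ [(token, label)], "O") := by
        simp [stepA, hO]
      rw [hstep, ih, emitA]
      simp [hO]
    · by_cases hne : (prev != label) = true
      · have hstep : stepA (acc, prev) (token, label) = (acc ++ [(token, "B-" ++ label)], label) := by
          simp [stepA, hO, hne]
        rw [hstep, ih, emitA]
        simp [hO, hne]
      · have hstep : stepA (acc, prev) (token, label) = (acc ++ [(token, "I-" ++ label)], label) := by
          simp [stepA, hO, hne]
        rw [hstep, ih, emitA]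
        simp [hO, hne]

-- head of a dropWhile never satisfies the predicate
lemma head?_dropWhile_false {α : Type} (p : α → Bool) (l : List α) {x : α}
    (h : (l.dropWhile p).head? = some x) : p x = false := by
  have hne : l.dropWhile p ≠ [] := by intro e; rw [e] at h; simp at h
  have hx : (l.dropWhile p).head hne = x := by
    rw [List.head?_eq_some_head hne] at h; exact Option.some.inj h
  have hnp := List.head_dropWhile_not p hne
  rw [hx] at hnp; simpa using hnp

-- emitA walks through an "O" run unchanged
lemma emitA_run_O (run rest : List (String × String))
    (h : ∀ p ∈ run, p.2 = "O") : emitA "O" (run ++ rest) = run ++ emitA "O" rest := by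
  induction run with
  | nil => simp
  | cons p run' ih =>
    obtain ⟨t, l⟩ := p
    have hl : l = "O" := h (t, l) (by simp)
    subst hl
    simp only [List.cons_append, emitA, beq_self_eq_true, if_true]
    rw [ih (fun q hq => h q (by simp [hq]))]

-- emitA gives "I-" to every token of a non-"O" run once prev equals the run label
lemma emitA_run_I (label : String) (hO : label ≠ "O") (run rest : List (String × String))
    (h : ∀ p ∈ run, p.2 = label) :
    emitA label (run ++ rest) = run.map (fun p => (p.1, "I-" ++ label)) ++ emitA label rest := by
  induction run with
  | nil => simp
  | cons p run' ih =>
    obtain ⟨t, l⟩ := p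
    have hl : l = label := h (t, l) (by simp)
    subst hl
    simp only [List.cons_append, emitA, beq_iff_eq, hO, if_false, bne_self_eq_false,
      Bool.false_eq_true, List.map_cons]
    rw [ih (fun q hq => h q (by simp [hq]))]

-- main bridge: whenever prev cannot spuriously continue the head run, emitA = iobRuns
lemma emitA_eq_iobRuns_aux : ∀ (n : Nat) (xs : List (String × String)), xs.length ≤ n →
    ∀ (prev : String), (∀ h ∈ xs.head?, h.2 = "O" ∨ prev ≠ h.2) → emitA prev xs = iobRuns xs := by
  intro n
  induction n with
  | zero =>
    intro xs hlen prev _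
    have hnil : xs = [] := List.eq_nil_of_length_eq_zero (Nat.le_zero.mp hlen)
    subst hnil
    simp [emitA, iobRuns]
  | succ n ihn =>
    intro xs hlen prev hprev
    rcases xs with _ | ⟨⟨token, label⟩, rest⟩
    · simp [emitA, iobRuns]
    · have hlen' : (rest.dropWhile (fun p : String × String => p.2 == label)).length ≤ n := by
        have := List.length_dropWhile_le (fun p : String × String => p.2 == label) rest
        simp only [List.length_cons] at hlen
        omega
      have hcond : ∀ h ∈ (rest.dropWhile (fun p : String × String => p.2 == label)).head?,
          h.2 = "O" ∨ label ≠ h.2 := by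
        intro h hh
        right
        have hf := head?_dropWhile_false (fun p : String × String => p.2 == label) rest hh
        intro hc
        simp [← hc] at hf
      by_cases hO : (label == "O") = true
      · have hOeq : label = "O" := by simpa using hO
        subst hOeq
        have hrun : ∀ p ∈ rest.takeWhile (fun p : String × String => p.2 == "O"), p.2 = "O" := by
          intro p hp
          simpa using List.mem_takeWhile_imp hp
        rw [emitA, if_pos hO]
        conv_lhs =>
          rw [← List.takeWhile_append_dropWhile
            (p := fun p : String × String => p.2 == "O") (l := rest)]
        rw [emitA_run_O _ _ hrun, ihn _ hlen' "O" hcond]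
        simp [iobRuns]
      · have hOne : label ≠ "O" := by simpa using hO
        have hpne : prev ≠ label := by
          rcases hprev (token, label) (by simp) with h | h
          · exact absurd h hOne
          · exact h
        have hbne : (prev != label) = true := by simpa using hpne
        have hrun : ∀ p ∈ rest.takeWhile (fun p : String × String => p.2 == label), p.2 = label := by
          intro p hp
          simpa using List.mem_takeWhile_imp hp
        rw [emitA, if_neg hO, if_pos hbne]
        conv_lhs =>
          rw [← List.takeWhile_append_dropWhile
            (p := fun p : String × String => p.2 == label) (l := rest)]
        rw [emitA_run_I label hOne _ _ hrun, ihn _ hlen' label hcond]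
        simp [iobRuns, hO]

-- ===== VERDICT (by name: the statement is the Claim_ definition above) =====
theorem add_iob_tags_spec : Claim_equal_add_iob_tags := by
  intro xs _
  unfold Spec_add_iob_tags add_iob_tags add_iob_tags_alt
  rw [foldA_eq_emitA, List.nil_append]
  apply emitA_eq_iobRuns_aux _ _ (Nat.le_refl _)
  intro h _
  by_cases hc : h.2 = "O"
  · exact Or.inl hc
  · exact Or.inr (fun hcc => hc hcc.symm)
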